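-- pv_equiv track=rewrite | github.com/ivchen116/PopStation | utils/res.py | number_to_voice_files
-- ===== SOURCE A (Python) =====
-- def number_to_voice_files(num):
--     # 定义数字和单位对应的音频文件
--     units = ['', 'shi.wav', 'bai.wav', 'qian.wav', 'wan.wav']
--     digits = ['0.wav', '1.wav', '2.wav', '3.wav', '4.wav', '5.wav', '6.wav', '7.wav', '8.wav', '9.wav']
--
--     # 特殊情况：0 的处理
--     if num == 0:
--         return [digits[0]]
--
--     result = []
--     unit_pos = 0
--     prev_digit = None  # 用于记录前一个数字，避免处理重复的 "零"
--
--     # 循环处理数字的每一位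
--     while num > 0:
--         digit = num % 10
--         num //= 10
--
--         # 如果该位数字不是 0，插入数字音频文件
--         if digit != 0:
--             result.insert(0, digits[digit])
--             # 如果该位不是最低位，且单位不是空，插入单位音频文件
--             if unit_pos > 0:
--                 result.insert(1, units[unit_pos])  # 向第二个位置插入单位，防止单位和数字顺序错误
--         elif prev_digit != 0:  # 只有前一位数字不为 0 时才插入 "零"
--             result.insert(0, digits[0])  # "零" 的音频文件
--
--         # 更新单位
--         prev_digit = digit
--         unit_pos += 1
--
--     # 处理末尾的零：如果最后一个数字是零，则移除末尾的零
--     if result[-1] == '0.wav':  # 如果末尾是“零”，就去掉它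
--         result.pop()
--
--     # 开头以一十X略为十X
--     if len(result) > 1 and result[0] == '1.wav' and result[1] == 'shi.wav':
--         result = result[1:]
--
--     return result
-- ===== SOURCE B (Python) =====
-- def number_to_voice_files(num):
--     # MSB-to-LSB single pass over the digit list; zero-collapsing and the
--     # leading "shi" rule are handled inline instead of by post-editing.
--     units = ['', 'shi.wav', 'bai.wav', 'qian.wav', 'wan.wav']
--     digits = ['0.wav', '1.wav', '2.wav', '3.wav', '4.wav', '5.wav', '6.wav', '7.wav', '8.wav', '9.wav']
--     if num == 0:
--         return [digits[0]]
--     ds = []  # least-significant digit first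
--     n = num
--     while n > 0:
--         ds.append(n % 10)
--         n //= 10
--     out = []
--     for i in reversed(range(len(ds))):  # i is the positional unit index, MSB first
--         d = ds[i]
--         if d != 0:
--             if i == len(ds) - 1 and i == 1 and d == 1:
--                 out.append(units[1])  # leading 10..19: say "shi", not "yi shi"
--             else:
--                 out.append(digits[d])
--                 if i > 0:
--                     out.append(units[i])
--         elif i > 0 and ds[i - 1] != 0:
--             out.append(digits[0])  # one "ling" before the next nonzero digit
--     return out
-- ===== Notes on version B (the rewrite author's own statement) =====
-- stated objective: alternative
-- what changed: B extracts the digit list once and emits the audio files in a single MSB-to-LSB pass with a one-digit lookahead (zero-collapsing and the leading 'shi' rule decided inline), instead of A's LSB-to-MSB loop with front insertions followed by post-editing (trailing-zero pop and '1.wav shi.wav' slice).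
-- outside the precondition, e.g. on number_to_voice_files(100000): A raises IndexError, B raises IndexError; on number_to_voice_files(-3): A raises IndexError, B returns []
import Mathlib
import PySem

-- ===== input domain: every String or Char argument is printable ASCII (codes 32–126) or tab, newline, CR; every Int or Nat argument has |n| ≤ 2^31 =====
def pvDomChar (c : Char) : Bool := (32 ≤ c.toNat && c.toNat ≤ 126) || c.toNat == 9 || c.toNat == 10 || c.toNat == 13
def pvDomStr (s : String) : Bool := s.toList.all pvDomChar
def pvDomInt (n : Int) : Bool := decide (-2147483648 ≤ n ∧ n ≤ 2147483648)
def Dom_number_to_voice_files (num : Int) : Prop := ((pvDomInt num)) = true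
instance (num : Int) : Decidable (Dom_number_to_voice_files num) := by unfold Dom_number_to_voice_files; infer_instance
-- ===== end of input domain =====

-- B emits the files in one MSB-to-LSB pass over the digit list with a one-digit
-- lookahead, instead of A's LSB-to-MSB loop with front insertions plus post-editing.

-- ===== PORT A =====
def unitsTbl : List String := ["", "shi.wav", "bai.wav", "qian.wav", "wan.wav"]
def digitsTbl : List String :=
  ["0.wav", "1.wav", "2.wav", "3.wav", "4.wav", "5.wav", "6.wav", "7.wav", "8.wav", "9.wav"]

-- the `while num > 0` loop of A (front insertions on `result`)
def loopA (num unit_pos : Int) (prev : Option Int) (result : List String) : List String :=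
  if _h : 0 < num then
    let digit := PySem.Int.mod num 10
    let num' := PySem.Int.floordiv num 10
    let result' :=
      if digit ≠ 0 then
        let r1 := PySem.List.insert result 0 (PySem.List.pyGetD digitsTbl digit "")
        if unit_pos > 0 then PySem.List.insert r1 1 (PySem.List.pyGetD unitsTbl unit_pos "") else r1
      else if prev ≠ some 0 then PySem.List.insert result 0 (PySem.List.pyGetD digitsTbl 0 "")
      else result
    loopA num' (unit_pos + 1) (some digit) result'
  else result
termination_by num.toNat
decreasing_by
  simp only [PySem.Int.floordiv_eq_ediv_of_pos (by omega : (0:Int) < 10)]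
  omega

-- `if result[-1] == '0.wav': result.pop()`  (pyGetD: Pre_ guarantees result nonempty)
def popTrail (result : List String) : List String :=
  if PySem.List.pyGetD result (-1) "" == "0.wav" then
    match PySem.List.pop? result with
    | some p => p.2
    | none => result
  else result

-- `if len(result) > 1 and result[0] == '1.wav' and result[1] == 'shi.wav': result = result[1:]`
def stripShi (result : List String) : List String :=
  if result.length > 1 ∧ PySem.List.pyGetD result 0 "" == "1.wav" ∧ PySem.List.pyGetD result 1 "" == "shi.wav" then
    PySem.List.slice result (some 1) none
  else result

def number_to_voice_files (num : Int) : List String :=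
  if num == 0 then [PySem.List.pyGetD digitsTbl 0 ""]
  else stripShi (popTrail (loopA num 0 none []))

-- ===== PORT B =====
-- B's `while n > 0: ds.append(n % 10); n //= 10`
def dsLoop (n : Int) (ds : List Int) : List Int :=
  if _h : 0 < n then dsLoop (PySem.Int.floordiv n 10) (ds ++ [PySem.Int.mod n 10]) else ds
termination_by n.toNat
decreasing_by
  simp only [PySem.Int.floordiv_eq_ediv_of_pos (by omega : (0:Int) < 10)]
  omega

-- the body of B's `for i in reversed(range(len(ds)))` loop
def stepB (ds : List Int) (out : List String) (i : Int) : List String :=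
  let d := PySem.List.pyGetD ds i 0
  if d ≠ 0 then
    if i = (ds.length : Int) - 1 ∧ i = 1 ∧ d = 1 then
      out ++ [PySem.List.pyGetD unitsTbl 1 ""]
    else
      let out := out ++ [PySem.List.pyGetD digitsTbl d ""]
      if i > 0 then out ++ [PySem.List.pyGetD unitsTbl i ""] else out
  else if i > 0 ∧ PySem.List.pyGetD ds (i - 1) 0 ≠ 0 then
    out ++ [PySem.List.pyGetD digitsTbl 0 ""]
  else out

def number_to_voice_files_alt (num : Int) : List String :=
  if num == 0 then [PySem.List.pyGetD digitsTbl 0 ""]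
  else
    let ds := dsLoop num []
    ((PySem.List.pyRange 0 (ds.length : Int) 1).reverse).foldl (stepB ds) []

-- ===== PRECONDITION & SPEC =====
-- Pre_ excludes exactly the inputs on which the Python A raises IndexError:
-- negative num (A indexes the empty result list) and num ≥ 100000 (units[unit_pos] overflows).
def Pre_number_to_voice_files (num : Int) : Prop := 0 ≤ num ∧ num < 100000
instance (num : Int) : Decidable (Pre_number_to_voice_files num) := by
  unfold Pre_number_to_voice_files; infer_instance

def pvWitness_number_to_voice_files : Int := 101

def Spec_number_to_voice_files (num : Int) (out : List String) : Prop :=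
  out = number_to_voice_files_alt num
instance (num : Int) (out : List String) : Decidable (Spec_number_to_voice_files num out) := by
  unfold Spec_number_to_voice_files; infer_instance

-- ===== CLAIM =====
def Claim_equal_number_to_voice_files : Prop :=
  ∀ (num : Int), Dom_number_to_voice_files num → Pre_number_to_voice_files num →
    Spec_number_to_voice_files num (number_to_voice_files num)

-- ===== LEMMAS AND PROOFS =====

-- digits of num, least significant first (reference decomposition shared by both proofs)
def dsRev (n : Int) : List Int :=
  if _h : 0 < n then PySem.Int.mod n 10 :: dsRev (PySem.Int.floordiv n 10) else []
termination_by n.toNat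
decreasing_by
  simp only [PySem.Int.floordiv_eq_ediv_of_pos (by omega : (0:Int) < 10)]
  omega

-- the chunk A's loop prepends for one digit (prev = the previously processed, lower digit)
def chunkA (d pos : Int) (prev : Option Int) : List String :=
  if d ≠ 0 then
    [PySem.List.pyGetD digitsTbl d ""] ++ (if pos > 0 then [PySem.List.pyGetD unitsTbl pos ""] else [])
  else if prev ≠ some 0 then ["0.wav"] else []

-- the chunk B emits for one digit (next = the lookahead, lower digit; none at the end)
def chunkC (d pos : Int) (next : Option Int) : List String :=
  if d ≠ 0 then
    [PySem.List.pyGetD digitsTbl d ""] ++ (if pos > 0 then [PySem.List.pyGetD unitsTbl pos ""] else [])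
  else if next.getD 0 ≠ 0 then ["0.wav"] else []

-- generic MSB-first renderer: position = base + #remaining, lookahead from the list (prev at the end)
def rend (c : Int → Int → Option Int → List String) : List Int → Int → Option Int → List String
  | [], _, _ => []
  | d :: rest, base, prev =>
      c d (base + (rest.length : Int))
        (match rest.head? with | some k => some k | none => prev) ++ rend c rest base prev

-- B's pass, structurally (top = "this is the most significant digit")
def rendB : List Int → Bool → List String
  | [], _ => []
  | d :: rest, top =>
      (if d ≠ 0 then
         if top = true ∧ (rest.length : Int) = 1 ∧ d = 1 then ["shi.wav"]
         else [PySem.List.pyGetD digitsTbl d ""] ++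
              (if (rest.length : Int) > 0 then [PySem.List.pyGetD unitsTbl (rest.length : Int) ""] else [])
       else if rest.head?.getD 0 ≠ 0 then ["0.wav"] else []) ++ rendB rest false

lemma rend_nil (c : Int → Int → Option Int → List String) (base : Int) (prev : Option Int) :
    rend c [] base prev = [] := rfl

lemma rend_cons (c : Int → Int → Option Int → List String) (d : Int) (rest : List Int)
    (base : Int) (prev : Option Int) :
    rend c (d :: rest) base prev =
      c d (base + (rest.length : Int))
        (match rest.head? with | some k => some k | none => prev) ++ rend c rest base prev := rfl

lemma rendB_nil (top : Bool) : rendB [] top = [] := rfl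

lemma rendB_cons (d : Int) (rest : List Int) (top : Bool) :
    rendB (d :: rest) top =
      (if d ≠ 0 then
         if top = true ∧ (rest.length : Int) = 1 ∧ d = 1 then ["shi.wav"]
         else [PySem.List.pyGetD digitsTbl d ""] ++
              (if (rest.length : Int) > 0 then [PySem.List.pyGetD unitsTbl (rest.length : Int) ""] else [])
       else if rest.head?.getD 0 ≠ 0 then ["0.wav"] else []) ++ rendB rest false := rfl

lemma rend_append (c : Int → Int → Option Int → List String) (r : List Int) (d : Int)
    (prev : Option Int) : ∀ base,
    rend c (r ++ [d]) base prev = rend c r (base + 1) (some d) ++ c d base prev := by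
  induction r with
  | nil => intro base; simp [rend]
  | cons e r ih =>
      intro base
      rw [List.cons_append, rend_cons, rend_cons, ih]
      have hl : base + (((r ++ [d]).length : Nat) : Int) = (base + 1) + (r.length : Int) := by
        simp; ring
      have ho : (match (r ++ [d]).head? with | some k => some k | none => prev) =
          (match r.head? with | some k => some k | none => some d) := by
        cases r <;> simp
      rw [hl, ho, List.append_assoc]

lemma loopA_eq (num : Int) : ∀ (up : Int) (prev : Option Int) (res : List String),
    loopA num up prev res = rend chunkA (dsRev num).reverse up prev ++ res := by
  induction num using dsRev.induct with
  | case1 n h ih =>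
      intro up prev res
      rw [loopA]
      simp only [dif_pos h]
      rw [ih]
      conv_rhs => rw [dsRev]
      simp only [dif_pos h, List.reverse_cons, rend_append, List.append_assoc]
      congr 1
      simp only [chunkA]
      by_cases hd : PySem.Int.mod n 10 ≠ 0
      · simp only [if_pos hd, PySem.List.insert_zero]
        by_cases hu : up > 0
        · rw [if_pos hu, if_pos hu, PySem.List.insert_ofNat _ 1 _ (by simp)]
          simp
        · rw [if_neg hu, if_neg hu]; simp
      · simp only [if_neg hd]
        by_cases hp : prev ≠ some 0
        · simp only [if_pos hp, if_pos hp, PySem.List.insert_zero]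
          rfl
        · simp [hp]
  | case2 n h =>
      intro up prev res
      rw [loopA, dsRev]
      simp [h, rend]

lemma dsLoop_eq (n : Int) : ∀ acc, dsLoop n acc = acc ++ dsRev n := by
  induction n using dsRev.induct with
  | case1 n h ih =>
      intro acc
      rw [dsLoop, dsRev]
      simp only [dif_pos h]
      rw [ih, List.append_assoc]
      rfl
  | case2 n h =>
      intro acc
      rw [dsLoop, dsRev]
      simp [h]

lemma dsRev_digits (n : Int) : ∀ d ∈ dsRev n, 0 ≤ d ∧ d < 10 := by
  induction n using dsRev.induct with
  | case1 n h ih =>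
      intro d hd
      rw [dsRev] at hd
      simp only [dif_pos h, List.mem_cons] at hd
      rcases hd with rfl | hd
      · exact ⟨PySem.Int.mod_nonneg _ (by omega), PySem.Int.mod_lt _ (by omega)⟩
      · exact ih d hd
  | case2 n h =>
      intro d hd
      rw [dsRev] at hd
      simp [h] at hd

lemma dsRev_msb (n : Int) : 0 < n → ∃ h t, (dsRev n).reverse = h :: t ∧ h ≠ 0 := by
  induction n using dsRev.induct with
  | case1 n hpos ih =>
      intro _
      rw [dsRev]
      simp only [dif_pos hpos, List.reverse_cons]
      by_cases hq : 0 < PySem.Int.floordiv n 10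
      · obtain ⟨h, t, he, hne⟩ := ih hq
        exact ⟨h, t ++ [PySem.Int.mod n 10], by rw [he, List.cons_append], hne⟩
      · have h0 : PySem.Int.floordiv n 10 = 0 := by
          have h1 := PySem.Int.floordiv_eq_ediv_of_pos (a := n) (by omega : (0:Int) < 10)
          omega
        have hm : PySem.Int.mod n 10 = n := by
          have h2 := PySem.Int.floordiv_mul_add_mod n 10
          rw [h0] at h2; omega
        refine ⟨PySem.Int.mod n 10, [], ?_, by omega⟩
        rw [dsRev, h0]
        simp
  | case2 n h =>
      intro hpos
      omega

lemma chunkAC (d pos j : Int) : chunkA d pos (some j) = chunkC d pos (some j) := by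
  by_cases hd : d = 0 <;> simp [chunkA, chunkC, hd]

lemma rend_AC (r : List Int) : ∀ (base j : Int),
    rend chunkA r base (some j) = rend chunkC r base (some j) := by
  induction r with
  | nil => intro base j; rfl
  | cons e r ih =>
      intro base j
      rw [rend_cons, rend_cons, ih]
      congr 1
      cases hr : r.head? with
      | none => simp [chunkAC]
      | some k => simp [chunkAC]

lemma rendB_false (r : List Int) : rendB r false = rend chunkC r 0 none := by
  induction r with
  | nil => rfl
  | cons e r ih =>
      rw [rendB_cons, rend_cons, ih]
      congr 1
      cases hr : r.head? with
      | none => by_cases he : e = 0 <;> simp [chunkC, he, hr]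
      | some k => by_cases he : e = 0 <;> simp [chunkC, he, hr]

lemma take_reverse_head? (ds : List Int) (k : Nat) (hk : 0 < k) (hlen : k ≤ ds.length) :
    ((ds.take k).reverse).head? = some (ds[k - 1]'(by omega)) := by
  rw [List.head?_reverse, List.getLast?_eq_getElem?, List.length_take]
  have hmin : min k ds.length = k := by omega
  rw [hmin, List.getElem?_take_of_lt (by omega), List.getElem?_eq_getElem (by omega)]

lemma foldB (ds : List Int) : ∀ (k : Nat), k ≤ ds.length → ∀ (out : List String),
    ((PySem.List.pyRange 0 (k : Int) 1).reverse).foldl (stepB ds) out =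
      out ++ rendB ((ds.take k).reverse) (decide (k = ds.length)) := by
  intro k
  induction k with
  | zero =>
      intro _ out
      rw [PySem.List.pyRange_one_eq_nil (by omega)]
      simp [rendB]
  | succ k ih =>
      intro hk out
      have hklt : k < ds.length := hk
      have hcast : ((k + 1 : Nat) : Int) = (k : Int) + 1 := by push_cast; ring
      rw [hcast, PySem.List.pyRange_one_succ_right (by omega), List.reverse_append]
      simp only [List.reverse_singleton, List.singleton_append, List.foldl_cons]
      rw [ih (by omega) (stepB ds out (k : Int))]
      have hfalse : (decide (k = ds.length)) = false := by simp; omega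
      rw [hfalse]
      have htake : ds.take (k + 1) = ds.take k ++ [ds[k]] := by
        rw [List.take_succ, List.getElem?_eq_getElem hklt]
        rfl
      rw [htake, List.reverse_append, List.reverse_singleton, List.singleton_append,
        rendB_cons, ← List.append_assoc]
      congr 1
      have hlen : ((((ds.take k).reverse).length : Nat) : Int) = (k : Int) := by
        simp [List.length_take]
        omega
      have hd : PySem.List.pyGetD ds (k : Int) 0 = ds[k] := by
        rw [PySem.List.pyGetD_natCast]
        simp [List.getD, List.getElem?_eq_getElem hklt]
      by_cases hk0 : k = 0
      · subst hk0
        simp only [Nat.cast_zero] at hd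
        by_cases h1 : ds[0] = 0 <;> simp [stepB, hd, h1]
      · have hkp : (0 : Int) < (k : Int) := by exact_mod_cast Nat.pos_of_ne_zero hk0
        have hm1 : PySem.List.pyGetD ds ((k : Int) - 1) 0 = ds[k - 1]'(by omega) := by
          have hc2 : ((k : Int) - 1) = ((k - 1 : Nat) : Int) := by omega
          rw [hc2, PySem.List.pyGetD_natCast]
          simp [List.getD, List.getElem?_eq_getElem (by omega : k - 1 < ds.length)]
        have hhd : ((ds.take k).reverse).head? = some (ds[k - 1]'(by omega)) :=
          take_reverse_head? ds k (by omega) (by omega)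
        have hiff : ((k : Int) = (ds.length : Int) - 1) ↔ (decide (k + 1 = ds.length) = true) := by
          simp only [decide_eq_true_eq]
          omega
        simp only [stepB, hd, hlen, hm1, hhd, Option.getD_some, ← hiff]
        by_cases h1 : ds[k] = 0
        · by_cases h2 : ds[k - 1]'(by omega) = 0 <;>
            simp [h1, h2, hkp, Nat.pos_of_ne_zero hk0,
              (by decide : PySem.List.pyGetD digitsTbl (0 : Int) "" = "0.wav")]
        · by_cases hc : ((k : Int) = (ds.length : Int) - 1 ∧ (k : Int) = 1 ∧ ds[k] = 1)
          · rw [if_pos h1, if_pos h1, if_pos hc, if_pos hc]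
            have hu : PySem.List.pyGetD unitsTbl 1 "" = "shi.wav" := by decide
            rw [hu]
          · rw [if_pos h1, if_pos h1, if_neg hc, if_neg hc, if_pos hkp, if_pos hkp]
            simp

lemma df_ne0 (d : Int) (h1 : 0 ≤ d) (h2 : d < 10) (h3 : d ≠ 0) :
    PySem.List.pyGetD digitsTbl d "" ≠ "0.wav" := by
  interval_cases d
  · exact absurd rfl h3
  all_goals decide

lemma df_ne1 (d : Int) (h1 : 0 ≤ d) (h2 : d < 10) (h3 : d ≠ 1) :
    PySem.List.pyGetD digitsTbl d "" ≠ "1.wav" := by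
  interval_cases d
  · decide
  · exact absurd rfl h3
  all_goals decide

lemma uf_ne_shi (p : Nat) (h1 : p ≠ 1) :
    PySem.List.pyGetD unitsTbl ((p : Nat) : Int) "" ≠ "shi.wav" := by
  rw [PySem.List.pyGetD_natCast]
  match p, h1 with
  | 0, _ => decide
  | 1, h => exact absurd rfl h
  | 2, _ => decide
  | 3, _ => decide
  | 4, _ => decide
  | (q + 5), _ =>
      have hout : List.getD unitsTbl (q + 5) "" = "" := by
        rw [List.getD_eq_getElem?_getD, List.getElem?_eq_none (by simp [unitsTbl])]
        rfl
      rw [hout]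
      decide

lemma popTrail_zero (X : List String) : popTrail (X ++ ["0.wav"]) = X := by
  rw [popTrail, if_pos (by rw [PySem.List.pyGetD_neg_one_append_singleton]; decide),
    PySem.List.pop?_last]

lemma popTrail_keep (X : List String) (s : String) (hs : s ≠ "0.wav") :
    popTrail (X ++ [s]) = X ++ [s] := by
  rw [popTrail, if_neg]
  rw [PySem.List.pyGetD_neg_one_append_singleton]
  simp [hs]

lemma pyGetD_one_cons (a b : String) (W : List String) :
    PySem.List.pyGetD (a :: b :: W) 1 "" = b := by
  rw [PySem.List.pyGetD_ofNat' _ 1 _]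
  rfl

lemma stripShi_single (a : String) : stripShi [a] = [a] := by
  rw [stripShi, if_neg]
  simp

lemma stripShi_pair (W : List String) :
    stripShi ("1.wav" :: "shi.wav" :: W) = "shi.wav" :: W := by
  rw [stripShi, if_pos ⟨by simp, by rw [PySem.List.pyGetD_zero_cons]; decide,
      by rw [pyGetD_one_cons]; decide⟩, PySem.List.slice_from_one]
  rfl

lemma stripShi_no1 (a : String) (W : List String) (ha : a ≠ "1.wav") :
    stripShi (a :: W) = a :: W := by
  rw [stripShi, if_neg]
  rw [PySem.List.pyGetD_zero_cons]
  simp [ha]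

lemma stripShi_no2 (a b : String) (W : List String) (hb : b ≠ "shi.wav") :
    stripShi (a :: b :: W) = a :: b :: W := by
  rw [stripShi, if_neg]
  rw [pyGetD_one_cons]
  simp [hb]

lemma main_render (h : Int) (t : List Int) (hh : h ≠ 0)
    (hv : ∀ d ∈ h :: t, 0 ≤ d ∧ d < 10) :
    stripShi (popTrail (rend chunkA (h :: t) 0 none)) = rendB (h :: t) true := by
  obtain ⟨hh0, hh10⟩ := hv h (by simp)
  rcases List.eq_nil_or_concat t with rfl | ⟨r2, dl, rfl⟩
  · -- single digit
    rw [rend_cons, rend_nil, rendB_cons, rendB_nil]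
    simp only [List.head?_nil, List.length_nil, Nat.cast_zero, add_zero, List.append_nil]
    have hA : chunkA h 0 none = [PySem.List.pyGetD digitsTbl h ""] := by
      rw [chunkA, if_pos hh, if_neg (by omega : ¬ (0:Int) > 0)]
      exact List.append_nil _
    rw [hA]
    have hp := popTrail_keep [] (PySem.List.pyGetD digitsTbl h "") (df_ne0 h hh0 hh10 hh)
    rw [List.nil_append] at hp
    rw [hp, stripShi_single]
    simp [hh]
  · -- at least two digits
    simp only [List.concat_eq_append] at hv ⊢
    obtain ⟨hdl0, hdl10⟩ := hv dl (by simp)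
    rw [show h :: (r2 ++ [dl]) = (h :: r2) ++ [dl] from rfl]
    rw [rend_append, rend_AC, rend_cons]
    rw [List.cons_append, rendB_cons, rendB_false, rend_append]
    simp only [zero_add]
    -- name the pieces
    set W := rend chunkC r2 1 (some dl) with hW
    set M := (match r2.head? with | some k => some k | none => some dl) with hM
    have hhead : chunkC h (1 + (r2.length : Int)) M =
        [PySem.List.pyGetD digitsTbl h ""] ++
          [PySem.List.pyGetD unitsTbl (1 + (r2.length : Int)) ""] := by
      rw [chunkC, if_pos hh, if_pos (by positivity)]
    -- pop the trailing zero (or keep the nonzero last digit)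
    have hpop : popTrail ((chunkC h (1 + (r2.length : Int)) M ++ W) ++ chunkA dl 0 none) =
        (chunkC h (1 + (r2.length : Int)) M ++ W) ++ chunkC dl 0 none := by
      by_cases hz : dl = 0
      · have hA : chunkA dl 0 none = ["0.wav"] := by simp [chunkA, hz]
        have hC : chunkC dl 0 none = [] := by simp [chunkC, hz]
        rw [hA, hC, popTrail_zero, List.append_nil]
      · have hA : chunkA dl 0 none = [PySem.List.pyGetD digitsTbl dl ""] := by
          rw [chunkA, if_pos hz, if_neg (by omega : ¬ (0:Int) > 0), List.append_nil]
        have hC : chunkC dl 0 none = [PySem.List.pyGetD digitsTbl dl ""] := by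
          rw [chunkC, if_pos hz, if_neg (by omega : ¬ (0:Int) > 0), List.append_nil]
        rw [hA, hC, popTrail_keep _ _ (df_ne0 dl hdl0 hdl10 hz)]
    rw [hpop, List.append_assoc]
    set W2 := W ++ chunkC dl 0 none with hW2
    -- strip the leading "1.wav shi.wav" pair exactly when B says "shi" alone
    rw [hhead]
    have hlen2 : (((r2 ++ [dl]).length : Nat) : Int) = (r2.length : Int) + 1 := by
      simp
    rw [hlen2]
    by_cases hone : h = 1 ∧ r2.length = 0
    · obtain ⟨h1, hr0⟩ := hone
      have hr2 : r2 = [] := List.eq_nil_of_length_eq_zero hr0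
      subst h1 hr2
      simp only [List.length_nil, Nat.cast_zero, add_zero, Nat.cast_ofNat]
      rw [(by decide : PySem.List.pyGetD digitsTbl (1 : Int) "" = "1.wav"),
        (by decide : PySem.List.pyGetD unitsTbl (1 : Int) "" = "shi.wav")]
      rw [if_pos (by norm_num)]
      have h2 : stripShi (["1.wav"] ++ ["shi.wav"] ++ W2) = "shi.wav" :: W2 := stripShi_pair W2
      rw [h2]
      rfl
    · rw [if_neg (show ¬ (True ∧ (r2.length : Int) + 1 = 1 ∧ h = 1) from by
          rintro ⟨-, hl, h1⟩
          exact hone ⟨h1, by omega⟩), if_pos (show ((r2.length : Int) + 1) > 0 from by positivity)]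
      rw [show (1 + (r2.length : Int)) = ((r2.length : Int) + 1) from by ring]
      rw [if_pos hh]
      simp only [List.cons_append, List.nil_append, List.singleton_append]
      by_cases h1 : h = 1
      · have hr0 : r2.length ≠ 0 := fun hr => hone ⟨h1, hr⟩
        have hcast : ((r2.length : Int) + 1) = (((r2.length + 1 : Nat) : Nat) : Int) := by
          push_cast; ring
        have hu : PySem.List.pyGetD unitsTbl ((r2.length : Int) + 1) "" ≠ "shi.wav" := by
          rw [hcast]
          exact uf_ne_shi (r2.length + 1) (by omega)
        exact stripShi_no2 _ _ _ hu
      · exact stripShi_no1 _ _ (df_ne1 h hh0 hh10 h1)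

-- ===== VERDICT =====
theorem number_to_voice_files_spec : Claim_equal_number_to_voice_files := by
  intro num _ hpre
  unfold Spec_number_to_voice_files
  obtain ⟨hlo, hhi⟩ : 0 ≤ num ∧ num < 100000 := hpre
  by_cases h0 : num = 0
  · subst h0
    rfl
  · have hbe : (num == 0) = false := by simp [h0]
    rw [number_to_voice_files, number_to_voice_files_alt]
    simp only [hbe, Bool.false_eq_true, if_false]
    rw [loopA_eq, List.append_nil, dsLoop_eq, List.nil_append]
    rw [foldB (dsRev num) (dsRev num).length le_rfl []]
    rw [List.nil_append, List.take_length,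
      (by simp : decide ((dsRev num).length = (dsRev num).length) = true)]
    obtain ⟨h, t, he, hne⟩ := dsRev_msb num (by omega)
    rw [he]
    refine main_render h t hne (fun d hd => dsRev_digits num d ?_)
    rw [← he] at hd
    exact List.mem_reverse.mp hd
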